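-- pv_equiv track=rewrite | github.com/sciona/sciona-atoms | src/sciona/atoms/supabase_backfill.py | dedupe_technical_description_rows
-- ===== SOURCE A (Python) =====
-- from typing import TYPE_CHECKING, Any, Iterable, Sequence
--
-- def dedupe_technical_description_rows(
--     rows: Sequence[dict[str, Any]],
-- ) -> list[dict[str, Any]]:
--     """Collapse duplicate technical-description upserts by conflict key."""
--     deduped: dict[tuple[str, str, str], dict[str, Any]] = {}
--     for row in rows:
--         key = (
--             str(row["atom_id"]),
--             str(row["kind"]),
--             str(row["language"]),
--         )
--         candidate = dict(row)
--         incumbent = deduped.get(key)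
--         if incumbent is None or _technical_description_rank(candidate) > _technical_description_rank(
--             incumbent
--         ):
--             deduped[key] = candidate
--     return [deduped[key] for key in sorted(deduped)]
--
-- def _technical_description_rank(row: dict[str, Any]) -> tuple[int, int, str]:
--     content = str(row.get("content") or "").strip()
--     return (1 if content else 0, len(content), content)
-- ===== SOURCE B (Python) =====
-- def dedupe_technical_description_rows(rows):
--     """Collapse duplicate technical-description upserts by conflict key (group-then-reduce)."""
--     groups = {}
--     for row in rows:
--         key = (str(row["atom_id"]), str(row["kind"]), str(row["language"]))
--         groups.setdefault(key, []).append(row)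
--     return [
--         dict(max(groups[key], key=_technical_description_rank))
--         for key in sorted(groups)
--     ]
--
-- def _technical_description_rank(row):
--     content = str(row.get("content") or "").strip()
--     return (1 if content else 0, len(content), content)
-- ===== Notes on version B (the rewrite author's own statement) =====
-- stated objective: alternative
-- what changed: Replaces A's single-pass incremental keep-the-best-per-key dict with a group-then-reduce decomposition: one pass builds key -> list of all rows, then each group's winner is selected with max(key=rank) (first maximal, matching A's strict-> tie rule).
import Mathlib
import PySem

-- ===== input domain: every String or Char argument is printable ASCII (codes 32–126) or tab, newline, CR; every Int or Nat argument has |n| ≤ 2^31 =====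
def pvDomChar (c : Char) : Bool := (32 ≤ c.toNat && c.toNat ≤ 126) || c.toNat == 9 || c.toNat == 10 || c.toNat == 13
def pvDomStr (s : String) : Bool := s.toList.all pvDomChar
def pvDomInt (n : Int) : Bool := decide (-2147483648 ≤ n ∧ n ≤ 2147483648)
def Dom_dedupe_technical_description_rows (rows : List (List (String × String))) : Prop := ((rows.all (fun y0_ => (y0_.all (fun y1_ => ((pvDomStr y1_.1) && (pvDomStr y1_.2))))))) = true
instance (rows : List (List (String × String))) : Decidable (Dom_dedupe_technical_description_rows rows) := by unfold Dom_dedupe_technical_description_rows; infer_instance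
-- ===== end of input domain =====

-- B replaces A's incremental keep-the-best-per-key dict by a group-then-reduce decomposition
-- (group all rows per conflict key, then pick each group's winner with a first-maximal max);
-- equivalence of the two is proved on inputs where every row has the three conflict keys.

-- Shared vocabulary of both Pythons: the conflict key of a row, the rank tuple's strict '>'
-- (Python tuple comparison written out), and Python's sorted() on the distinct key triples
-- (PySem.List.sorted needs an LT key and the product LT is not lexicographic, so sorted is
-- ported by hand in the insertion-sort shape PySem.List.sorted_eq_foldl_insertBy gives; it is
-- exact here because the sorted lists are duplicate-free).

def pvRowKey (row : List (String × String)) : String × String × String :=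
  let d := PySem.Dict.ofList row
  (d.getD "atom_id" "", d.getD "kind" "", d.getD "language" "")

-- _technical_description_rank, fused with the tuple '>' that is its only use:
-- rank(a) > rank(b) for rank(r) = (1 if content else 0, len(content), content).
def pvRankGt (a b : PySem.Dict String String) : Bool :=
  let ca := PySem.Str.strip (a.getD "content" "")
  let cb := PySem.Str.strip (b.getD "content" "")
  let fa : Nat := if ca = "" then 0 else 1
  let fb : Nat := if cb = "" then 0 else 1
  decide (fb < fa) ||
    (fa == fb && (decide (PySem.Str.len cb < PySem.Str.len ca) ||
      (PySem.Str.len ca == PySem.Str.len cb && decide (cb < ca))))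

def pvKeyLt (a b : String × String × String) : Bool :=
  decide (a.1 < b.1) ||
    (a.1 == b.1 && (decide (a.2.1 < b.2.1) ||
      (a.2.1 == b.2.1 && decide (a.2.2 < b.2.2))))

-- sorted(keys): Python's lexicographic tuple order, in PySem's insertion-sort shape.
def pvSortKeys (l : List (String × String × String)) : List (String × String × String) :=
  l.foldl (fun acc x => PySem.List.insertBy pvKeyLt x acc) []

-- ===== PORT A =====
def pvAStep (d : PySem.Dict (String × String × String) (PySem.Dict String String))
    (row : List (String × String)) :
    PySem.Dict (String × String × String) (PySem.Dict String String) :=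
  let key := pvRowKey row
  let candidate := PySem.Dict.ofList row          -- dict(row)
  match d.get? key with                           -- incumbent = deduped.get(key)
  | none => d.insert key candidate
  | some incumbent => if pvRankGt candidate incumbent then d.insert key candidate else d

def dedupe_technical_description_rows (rows : List (List (String × String))) :
    List (List (String × String)) :=
  let deduped := rows.foldl pvAStep PySem.Dict.empty
  (pvSortKeys deduped.keys).map (fun k => (deduped.getD k PySem.Dict.empty).items)

-- ===== PORT B =====
-- max(group, key=_technical_description_rank): keep the current best, replace only on strict '>'.
def pvPickMax (best : List (String × String)) (rest : List (List (String × String))) :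
    List (String × String) :=
  rest.foldl
    (fun best row =>
      if pvRankGt (PySem.Dict.ofList row) (PySem.Dict.ofList best) then row else best)
    best

def dedupe_technical_description_rows_alt (rows : List (List (String × String))) :
    List (List (String × String)) :=
  let groups : PySem.Dict (String × String × String) (List (List (String × String))) :=
    rows.foldl (fun d row => d.modify (pvRowKey row) [] (· ++ [row])) PySem.Dict.empty
  (pvSortKeys groups.keys).map (fun k =>
    match groups.getD k [] with
    | [] => []                                    -- unreachable: every key has a nonempty group
    | r :: rs => (PySem.Dict.ofList (pvPickMax r rs)).items)

-- ===== PRECONDITION & SPEC =====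
-- Pre_: every row carries the three conflict-key fields; on any other input the Python A
-- (and the Python B alike) raises KeyError at row["atom_id"] / row["kind"] / row["language"].
def Pre_dedupe_technical_description_rows (rows : List (List (String × String))) : Prop :=
  ∀ row ∈ rows, ("atom_id" ∈ row.map Prod.fst) ∧ ("kind" ∈ row.map Prod.fst) ∧
    ("language" ∈ row.map Prod.fst)
instance (rows : List (List (String × String))) : Decidable (Pre_dedupe_technical_description_rows rows) := by unfold Pre_dedupe_technical_description_rows; infer_instance

def pvWitness_dedupe_technical_description_rows : (List (List (String × String))) :=
  [[("atom_id", "a"), ("kind", "k"), ("language", "en"), ("content", " x ")],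
   [("atom_id", "a"), ("kind", "k"), ("language", "en"), ("content", "yy")]]

def Spec_dedupe_technical_description_rows (rows : List (List (String × String))) (out : List (List (String × String))) : Prop := out = dedupe_technical_description_rows_alt rows
instance (rows : List (List (String × String))) (out : List (List (String × String))) : Decidable (Spec_dedupe_technical_description_rows rows out) := by unfold Spec_dedupe_technical_description_rows; infer_instance

-- ===== CLAIM (what is proved, stated in full; the proofs are below) =====
def Claim_equal_dedupe_technical_description_rows : Prop := ∀ (rows : List (List (String × String))), Dom_dedupe_technical_description_rows rows → Pre_dedupe_technical_description_rows rows → Spec_dedupe_technical_description_rows rows (dedupe_technical_description_rows rows)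

-- ===== LEMMAS AND PROOFS =====

-- A's running best at key k, continued from an incumbent v over the candidates of a row list.
def pvDictPick (v : PySem.Dict String String) (g : List (List (String × String))) :
    PySem.Dict String String :=
  g.foldl (fun best row =>
    if pvRankGt (PySem.Dict.ofList row) best then PySem.Dict.ofList row else best) v

theorem pvDictPick_eq_pickMax (rs : List (List (String × String)))
    (r : List (String × String)) :
    pvDictPick (PySem.Dict.ofList r) rs = PySem.Dict.ofList (pvPickMax r rs) := by
  induction rs generalizing r with
  | nil => rfl
  | cons row rest ih =>
      simp only [pvDictPick, pvPickMax, List.foldl_cons] at *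
      rw [← apply_ite PySem.Dict.ofList]
      exact ih _

theorem pvA_get? (rows : List (List (String × String)))
    (d : PySem.Dict (String × String × String) (PySem.Dict String String))
    (k : String × String × String) :
    (rows.foldl pvAStep d).get? k =
      match d.get? k with
      | none =>
          match rows.filter (fun r => pvRowKey r == k) with
          | [] => none
          | r :: rs => some (pvDictPick (PySem.Dict.ofList r) rs)
      | some v => some (pvDictPick v (rows.filter (fun r => pvRowKey r == k))) := by
  induction rows generalizing d with
  | nil => cases h : d.get? k <;> simp [h, pvDictPick]
  | cons row rest ih =>
      simp only [List.foldl_cons, List.filter_cons]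
      rw [ih]
      by_cases hk : pvRowKey row = k
      · subst hk
        simp only [beq_self_eq_true, if_pos]
        cases h : d.get? (pvRowKey row) with
        | none =>
            have hstep : pvAStep d row = d.insert (pvRowKey row) (PySem.Dict.ofList row) := by
              simp [pvAStep, h]
            rw [hstep, PySem.Dict.get?_insert_self]
        | some v =>
            have hstep : pvAStep d row =
                if pvRankGt (PySem.Dict.ofList row) v
                then d.insert (pvRowKey row) (PySem.Dict.ofList row) else d := by
              simp [pvAStep, h]
            rw [hstep]
            by_cases hr : pvRankGt (PySem.Dict.ofList row) v
            · rw [if_pos hr, PySem.Dict.get?_insert_self]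
              simp [pvDictPick, hr]
            · rw [if_neg hr, h]
              simp [pvDictPick, hr]
      · have hbeq : (pvRowKey row == k) = false := by simpa using hk
        have hne : k ≠ pvRowKey row := fun h' => hk h'.symm
        have hget : (pvAStep d row).get? k = d.get? k := by
          cases h : d.get? (pvRowKey row) with
          | none =>
              have hstep : pvAStep d row = d.insert (pvRowKey row) (PySem.Dict.ofList row) := by
                simp [pvAStep, h]
              rw [hstep]
              exact PySem.Dict.get?_insert_of_ne _ _ hne
          | some v =>
              have hstep : pvAStep d row =
                  if pvRankGt (PySem.Dict.ofList row) v
                  then d.insert (pvRowKey row) (PySem.Dict.ofList row) else d := by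
                simp [pvAStep, h]
              rw [hstep]
              by_cases hr : pvRankGt (PySem.Dict.ofList row) v
              · rw [if_pos hr]
                exact PySem.Dict.get?_insert_of_ne _ _ hne
              · rw [if_neg hr]
        rw [hget, hbeq]
        simp

theorem pvA_keys (rows : List (List (String × String)))
    (d : PySem.Dict (String × String × String) (PySem.Dict String String)) :
    (rows.foldl pvAStep d).keys = PySem.Set.update d.keys (rows.map pvRowKey) := by
  induction rows generalizing d with
  | nil => simp [PySem.Set.update]
  | cons row rest ih =>
      simp only [List.foldl_cons, List.map_cons]
      rw [ih]
      have hstep : (pvAStep d row).keys = PySem.Set.add d.keys (pvRowKey row) := by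
        cases h : d.get? (pvRowKey row) with
        | none =>
            have hc : d.contains (pvRowKey row) = false := by
              simpa [PySem.Dict.get?_eq_none_iff_contains] using h
            have hnm : pvRowKey row ∉ d.keys := fun hm => by
              simp [(PySem.Dict.contains_iff_mem_keys d _).mpr hm] at hc
            have hstep0 : pvAStep d row = d.insert (pvRowKey row) (PySem.Dict.ofList row) := by
              simp [pvAStep, h]
            rw [hstep0, PySem.Dict.keys_insert_of_not_contains _ _ hc]
            simp [PySem.Set.add, hnm]
        | some v =>
            have hc : d.contains (pvRowKey row) = true := by
              have := PySem.Dict.contains_eq_isSome_get? d (pvRowKey row)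
              simp [this, h]
            have hm : pvRowKey row ∈ d.keys := (PySem.Dict.contains_iff_mem_keys d _).mp hc
            have hadd : PySem.Set.add d.keys (pvRowKey row) = d.keys := by
              simp [PySem.Set.add, hm]
            have hstep0 : pvAStep d row =
                if pvRankGt (PySem.Dict.ofList row) v
                then d.insert (pvRowKey row) (PySem.Dict.ofList row) else d := by
              simp [pvAStep, h]
            rw [hstep0, hadd]
            by_cases hr : pvRankGt (PySem.Dict.ofList row) v
            · rw [if_pos hr]
              exact PySem.Dict.keys_insert_of_contains _ _ hc
            · rw [if_neg hr]
      rw [hstep]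
      simp [PySem.Set.update]

theorem pvB_getD (rows : List (List (String × String))) (k : String × String × String) :
    (rows.foldl (fun d row => d.modify (pvRowKey row) [] (· ++ [row]))
        (PySem.Dict.empty : PySem.Dict (String × String × String)
          (List (List (String × String))))).getD k [] =
      rows.filter (fun r => pvRowKey r == k) := by
  have h : rows.foldl (fun d row => d.modify (pvRowKey row) [] (· ++ [row]))
      (PySem.Dict.empty : PySem.Dict (String × String × String)
        (List (List (String × String)))) =
      (rows.map (fun r => (pvRowKey r, r))).foldl
        (fun d p => d.modify p.1 [] (· ++ [p.2])) PySem.Dict.empty := by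
    rw [List.foldl_map]
  rw [h, PySem.Dict.getD_foldl_modify_append]
  simp [List.filter_map, Function.comp_def]

theorem pvMem_sortKeys (l acc : List (String × String × String))
    (k : String × String × String)
    (h : k ∈ l.foldl (fun acc x => PySem.List.insertBy pvKeyLt x acc) acc) :
    k ∈ l ∨ k ∈ acc := by
  induction l generalizing acc with
  | nil => exact Or.inr h
  | cons x rest ih =>
      rcases ih _ h with h' | h'
      · exact Or.inl (List.mem_cons_of_mem _ h')
      · rcases (PySem.List.mem_insertBy _ _ _ _).mp h' with rfl | h''
        · exact Or.inl (List.mem_cons_self)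
        · exact Or.inr h''

-- ===== VERDICT (by name: the statement is the Claim_ definition above) =====
theorem dedupe_technical_description_rows_spec : Claim_equal_dedupe_technical_description_rows := by
  intro rows _ _
  unfold Spec_dedupe_technical_description_rows
  unfold dedupe_technical_description_rows dedupe_technical_description_rows_alt
  simp only []
  rw [pvA_keys, PySem.Dict.keys_foldl_modify_key]
  apply List.map_congr_left
  intro k hk
  have hkl : k ∈ rows.map pvRowKey := by
    rcases pvMem_sortKeys _ _ _ hk with h | h
    · simpa [PySem.Set.update, ← PySem.Set.ofList_eq_foldl, PySem.Set.mem_ofList,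
        PySem.Dict.keys_empty] using h
    · simp at h
  rcases List.mem_map.mp hkl with ⟨r0, hr0, hkey⟩
  have hfil : r0 ∈ rows.filter (fun r => pvRowKey r == k) := by
    simp [List.mem_filter, hr0, hkey]
  rw [pvB_getD]
  cases hg : rows.filter (fun r => pvRowKey r == k) with
  | nil => rw [hg] at hfil; simp at hfil
  | cons r rs =>
      have hget : (rows.foldl pvAStep PySem.Dict.empty).get? k =
          some (pvDictPick (PySem.Dict.ofList r) rs) := by
        rw [pvA_get?, PySem.Dict.get?_empty, hg]
      rw [PySem.Dict.getD_of_get?_eq_some _ _ hget, pvDictPick_eq_pickMax]
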